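-- pv_equiv track=rewrite | github.com/dulinnan/compsci_assign1 | compsci130/get_middle_letter_dictionary.py | get_middle_letter_dictionary
-- ===== SOURCE A (Python) =====
-- def is_odd(number):
--     return False if (number % 2 == 0) else True
--
-- def extract_middlle_letter(word):
--     middle_letter = ""
--     word_lenth = len(word)
--     if (is_odd(word_lenth)):
--         middle_letter = word[int((word_lenth-1)/2)]
--     else:
--         middle_letter = word[int((word_lenth/2)-1)]
--     return middle_letter
--
-- def get_middle_letter_dictionary(sentence):
--     output = {}
--     words_list = sentence.split(" ")
--     all_lower_case_list = [word.lower() for word in words_list]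
--     for each_word in all_lower_case_list:
--         new_dict = {}
--         middle_letter_of_a_word = extract_middlle_letter(each_word)
--         new_value = []
--         if middle_letter_of_a_word in output.keys():
--             new_value = list(output.get(middle_letter_of_a_word))
--             new_value.append(each_word)
--             duplicates_removed_list = list(dict.fromkeys(new_value))
--             new_dict = {middle_letter_of_a_word: duplicates_removed_list}
--         else:
--             new_value.append(each_word)
--             new_dict ={middle_letter_of_a_word: new_value}
--         output.update(new_dict)
--     return output
-- ===== SOURCE B (Python) =====
-- def get_middle_letter_dictionary(sentence):
--     buckets = {}
--     for word in sentence.split(" "):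
--         w = word.lower()
--         mid = w[(len(w) + 1) // 2 - 1]
--         buckets.setdefault(mid, []).append(w)
--     return {mid: list(dict.fromkeys(ws)) for mid, ws in buckets.items()}
-- ===== Notes on version B (the rewrite author's own statement) =====
-- stated objective: simpler
-- what changed: A copies, appends to and re-deduplicates the affected bucket and re-inserts it on every word, choosing the middle index by an odd/even branch; B does two separate phases - one pass that unconditionally appends each lowercased word to its bucket using the closed-form index (len+1)//2-1, then a comprehension that dedups every bucket once with dict.fromkeys - with no helpers, no parity branch and no per-word bucket copy.
import Mathlib
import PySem

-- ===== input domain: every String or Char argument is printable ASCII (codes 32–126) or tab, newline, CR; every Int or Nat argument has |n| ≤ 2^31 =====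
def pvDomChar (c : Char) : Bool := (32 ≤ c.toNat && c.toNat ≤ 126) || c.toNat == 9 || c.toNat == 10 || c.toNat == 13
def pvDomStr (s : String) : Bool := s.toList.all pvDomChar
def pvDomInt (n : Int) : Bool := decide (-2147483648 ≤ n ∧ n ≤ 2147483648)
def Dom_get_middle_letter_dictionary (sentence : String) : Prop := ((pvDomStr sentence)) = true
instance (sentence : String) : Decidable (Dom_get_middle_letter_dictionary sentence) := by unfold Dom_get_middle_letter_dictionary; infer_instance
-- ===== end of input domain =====

-- B splits A's per-word copy-append-dedup-reinsert of a bucket into two phases — unconditional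
-- grouping with a closed-form middle index, then one dedup pass per bucket — for simplicity.

-- ===== PORT A =====
def pvA_is_odd (number : Int) : Bool :=
  if PySem.Int.mod number 2 == 0 then false else true

-- Python's word[i] is a 1-character str: the Option Char from pyGet? is wrapped into a String;
-- none = IndexError (empty word), excluded by Pre_.
def pvA_extract_middlle_letter (word : String) : Option String :=
  let word_lenth : Int := PySem.Str.len word
  if pvA_is_odd word_lenth then
    (PySem.Str.pyGet? word (PySem.Int.floordiv (word_lenth - 1) 2)).map (fun c => String.ofList [c])
  else
    (PySem.Str.pyGet? word (PySem.Int.floordiv word_lenth 2 - 1)).map (fun c => String.ofList [c])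

-- one iteration of A's for-loop (on `none` Python raises; the port skips, Pre_ excludes those inputs)
def pvA_step (output : PySem.Dict String (List String)) (each_word : String) :
    PySem.Dict String (List String) :=
  match pvA_extract_middlle_letter each_word with
  | none => output
  | some middle_letter_of_a_word =>
    if output.contains middle_letter_of_a_word then
      let new_value := output.getD middle_letter_of_a_word [] ++ [each_word]
      let duplicates_removed_list := PySem.List.dedup new_value
      output.insert middle_letter_of_a_word duplicates_removed_list
    else
      output.insert middle_letter_of_a_word [each_word]

def get_middle_letter_dictionary (sentence : String) : List (String × List String) :=
  let words_list := (PySem.Str.split? sentence " ").getD []   -- sep " " ≠ "", split? is always some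
  let all_lower_case_list := words_list.map PySem.Str.lower
  (all_lower_case_list.foldl pvA_step PySem.Dict.empty).items

-- ===== PORT B =====
-- w[(len(w)+1)//2 - 1]; none = IndexError on the empty word, excluded by Pre_.
def pvB_mid? (w : String) : Option String :=
  (PySem.Str.pyGet? w (PySem.Int.floordiv (PySem.Str.len w + 1) 2 - 1)).map
    (fun c => String.ofList [c])

-- first phase: buckets.setdefault(mid, []).append(w), unconditionally for every lowercased word
def pvB_group (buckets : PySem.Dict String (List String)) (word : String) :
    PySem.Dict String (List String) :=
  let w := PySem.Str.lower word
  match pvB_mid? w with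
  | none => buckets
  | some mid => buckets.modify mid [] (fun v => v ++ [w])

-- second phase: {mid: list(dict.fromkeys(ws)) for mid, ws in buckets.items()}
def get_middle_letter_dictionary_alt (sentence : String) : List (String × List String) :=
  let buckets := ((PySem.Str.split? sentence " ").getD []).foldl pvB_group PySem.Dict.empty
  buckets.items.map (fun p => (p.1, PySem.List.dedup p.2))

-- ===== PRECONDITION & SPEC =====
-- Pre_ excludes exactly the sentences some space-split chunk of which is empty (an empty sentence,
-- a leading/trailing space or two adjacent spaces): there A raises IndexError (and so does B).
def Pre_get_middle_letter_dictionary (sentence : String) : Prop :=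
  "" ∉ (PySem.Str.split? sentence " ").getD []
instance (sentence : String) : Decidable (Pre_get_middle_letter_dictionary sentence) := by
  unfold Pre_get_middle_letter_dictionary; infer_instance

def pvWitness_get_middle_letter_dictionary : String := "Cat dog cat ox"

def Spec_get_middle_letter_dictionary (sentence : String) (out : List (String × List String)) : Prop := out = get_middle_letter_dictionary_alt sentence
instance (sentence : String) (out : List (String × List String)) : Decidable (Spec_get_middle_letter_dictionary sentence out) := by unfold Spec_get_middle_letter_dictionary; infer_instance

-- ===== CLAIM (what is proved, stated in full; the proofs are below) =====
def Claim_equal_get_middle_letter_dictionary : Prop := ∀ (sentence : String), Dom_get_middle_letter_dictionary sentence → Pre_get_middle_letter_dictionary sentence → Spec_get_middle_letter_dictionary sentence (get_middle_letter_dictionary sentence)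

-- ===== LEMMAS AND PROOFS =====

-- B's closed-form index (n+1)//2 - 1 equals A's parity-branched index (n = a string length, a Nat)
theorem pv_idx_eq (k : Nat) :
    PySem.Int.floordiv ((k : Int) + 1) 2 - 1 =
    if pvA_is_odd (k : Int) then PySem.Int.floordiv ((k : Int) - 1) 2
    else PySem.Int.floordiv (k : Int) 2 - 1 := by
  have h2 : (0 : Int) < 2 := by norm_num
  have hpar : (k : Int) % 2 = 0 ∨ (k : Int) % 2 = 1 := by omega
  simp only [pvA_is_odd, PySem.Int.mod_eq_emod_of_pos h2, PySem.Int.floordiv_eq_ediv_of_pos h2]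
  rcases hpar with h | h <;> simp [h] <;> omega

theorem pv_mid_eq (w : String) : pvB_mid? w = pvA_extract_middlle_letter w := by
  simp only [pvB_mid?, pvA_extract_middlle_letter, PySem.Str.len_eq, pv_idx_eq]
  split_ifs <;> rfl

-- value-wise dedup of a dict's buckets, as a Dict
def pvDV (d : PySem.Dict String (List String)) : PySem.Dict String (List String) :=
  PySem.Dict.mk (d.items.map (fun p => (p.1, PySem.List.dedup p.2)))

theorem pvDV_contains (d : PySem.Dict String (List String)) (k : String) :
    (pvDV d).contains k = d.contains k := by
  cases d with
  | mk items =>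
    simp [pvDV, PySem.Dict.contains, List.any_map, Function.comp_def]


theorem pvDV_get? (d : PySem.Dict String (List String)) (k : String) :
    (pvDV d).get? k = (d.get? k).map PySem.List.dedup := by
  cases d with
  | mk items =>
    induction items with
    | nil => rfl
    | cons p rest ih =>
      simp only [pvDV, PySem.Dict.get?, List.map_cons, List.find?] at *
      by_cases hk : (p.1 == k) = true
      · simp [hk]
      · simp only [hk]
        exact ih

theorem pvDV_getD (d : PySem.Dict String (List String)) (k : String) :
    (pvDV d).getD k [] = PySem.List.dedup (d.getD k []) := by
  unfold PySem.Dict.getD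
  rw [pvDV_get?]
  cases d.get? k <;> rfl

theorem pv_dedup_absorb (l : List String) (w : String) :
    PySem.List.dedup (PySem.List.dedup l ++ [w]) = PySem.List.dedup (l ++ [w]) := by
  simp only [PySem.List.dedup_eq_ofList, PySem.Set.ofList_append_singleton]
  rw [PySem.Set.ofList_eq_self_of_nodup _ (PySem.Set.nodup_ofList l)]

-- the per-word step commutes with pvDV
theorem pv_step_comm (d : PySem.Dict String (List String)) (word : String) :
    pvA_step (pvDV d) (PySem.Str.lower word) = pvDV (pvB_group d word) := by
  simp only [pvA_step, pvB_group, pv_mid_eq]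
  cases hm : pvA_extract_middlle_letter (PySem.Str.lower word) with
  | none => rfl
  | some m =>
    simp only [PySem.Dict.modify, pvDV_contains, pvDV_getD]
    by_cases hc : d.contains m = true
    · rw [if_pos hc, pv_dedup_absorb]
      -- both sides are in-place replacements over the same items list
      simp only [PySem.Dict.insert, pvDV_contains, hc, if_pos]
      cases d with
      | mk items =>
        simp only [pvDV, List.map_map]
        congr 1
        apply List.map_congr_left
        intro p _
        by_cases hp : p.1 = m <;> simp [hp]
    · have hg : d.getD m [] = [] := by
        unfold PySem.Dict.getD
        rw [(PySem.Dict.get?_eq_none_iff_contains d m).mpr (by simpa using hc)]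
        rfl
      rw [if_neg hc, hg]
      -- both sides append a fresh (m, [w]) bucket
      simp only [PySem.Dict.insert, pvDV_contains, hc, Bool.false_eq_true]
      cases d with
      | mk items =>
        simp [pvDV,
          PySem.Set.ofList_eq_self_of_nodup [PySem.Str.lower word] (List.nodup_singleton _)]

theorem pv_fold_comm (ws : List String) (d : PySem.Dict String (List String)) :
    (ws.map PySem.Str.lower).foldl pvA_step (pvDV d) = pvDV (ws.foldl pvB_group d) := by
  induction ws generalizing d with
  | nil => rfl
  | cons w ws ih =>
    simp only [List.map_cons, List.foldl_cons, pv_step_comm]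
    exact ih _

-- ===== VERDICT (by name: the statement is the Claim_ definition above) =====
theorem get_middle_letter_dictionary_spec : Claim_equal_get_middle_letter_dictionary := by
  intro sentence _ _
  have h := pv_fold_comm ((PySem.Str.split? sentence " ").getD []) PySem.Dict.empty
  have he : pvDV PySem.Dict.empty = PySem.Dict.empty := rfl
  rw [he] at h
  simp only [Spec_get_middle_letter_dictionary, get_middle_letter_dictionary,
    get_middle_letter_dictionary_alt, h]
  rfl
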